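/- GENERATED by mk_final_copies.py from the proof of the farm's unit `vorbis_decode_packet_rest.4c` (farm:vorbis_decode_packet_rest.4c.1: Lemmas.lean) as the
   re-elaboration sweep compiled it — do not edit. -/
import Asan.CheckWalk
import Vorbis.Spec.PacketRestFrame
import Vorbis.Spec.PacketRestTest
import Vorbis.Spec.PacketRest3
import Vorbis.Spec.ReaderLemmas
import Vorbis.Spec.CodebookCarry
import Vorbis.Spec.Units.vorbis_decode_packet_rest_4c

/-
  THE LEMMAS OF UNIT vorbis_decode_packet_rest.4c (the inline DECODE_RAW of segment .4, 0x110d93 → 0x110cad).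
  The same code shape as segment .3b (farm/worked/vorbis_decode_packet_rest.3b: `decode_raw`), with the absolute cut assertions of
  segment .4 (`At4c` → `At4d`, Vorbis/Spec/PacketRest4.lean): every exit is ONE application of `at4d_of_stores` (= `Loop4.step'` with
  `k' = k` over the six-window footprint: the stack below the steady stack pointer and the bit reader's windows of `*f`).
    widen6, widen1      the segment's footprint inside the footprint of a round (`Loop4.step'`, `round4_inv`)
    book_same           the struct of the book reads the same over the segment's footprint
    at4d_of_stores      `At4d` from `At4c`
    inv_at_call         `DecodeInv` (and the book's address) at the call of codebook_decode_scalar_raw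
    vb_sub_ok, vb_sub_V1, vb_toInt, result_copy     the bit-level facts (from the proof of .3b / codebook_decode_start)
    segC                the walk: two stages (to the call's return / the check return 0x110dd8, then to the cut 0x110cad)
-/
open X86 X86.User Asan Vorbis Vorbis.Spec Vorbis.Spec.vorbis_decode_packet_rest

set_option maxRecDepth 4000
set_option maxHeartbeats 4000000

namespace Vorbis.Spec.vorbis_decode_packet_rest_4c

/-- **The footprint of the segment, widened to the footprint of a round** (`Loop4.step'`, `round4_inv`): the stack window below the
steady stack pointer and the bit reader's windows of `*f` are six of the seven windows of a round. -/
theorem widen6 {R f y z hi : Nat} {m m' : Mem} (hhi : R - 3000 ≤ hi)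
    (h : Mem.SameExcept [⟨R - 3856, R - 3000⟩, ⟨f + 48, f + 56⟩, ⟨f + 84, f + 96⟩, ⟨f + 136, f + 144⟩,
      ⟨f + 1484, f + 1749⟩, ⟨f + 1752, f + 1784⟩] m m') :
    Mem.SameExcept [⟨R - 3856, hi⟩, ⟨f + 48, f + 56⟩, ⟨f + 84, f + 96⟩, ⟨f + 136, f + 144⟩,
      ⟨f + 1484, f + 1749⟩, ⟨f + 1752, f + 1784⟩, ⟨y, z⟩] m m' := by
  apply h.mono
  intro w hw a h1 h2
  simp only [List.mem_cons, List.mem_nil_iff, or_false] at hw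
  rcases hw with rfl | rfl | rfl | rfl | rfl | rfl
  · refine ⟨_, List.mem_cons_self, h1, ?_⟩
    simp only [] at h2 ⊢
    omega
  · exact ⟨⟨f + 48, f + 56⟩, by simp only [List.mem_cons, true_or, or_true], h1, h2⟩
  · exact ⟨⟨f + 84, f + 96⟩, by simp only [List.mem_cons, true_or, or_true], h1, h2⟩
  · exact ⟨⟨f + 136, f + 144⟩, by simp only [List.mem_cons, true_or, or_true], h1, h2⟩
  · exact ⟨⟨f + 1484, f + 1749⟩, by simp only [List.mem_cons, true_or, or_true], h1, h2⟩
  · exact ⟨⟨f + 1752, f + 1784⟩, by simp only [List.mem_cons, true_or, or_true], h1, h2⟩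

/-- Stores below the steady stack pointer only (return addresses of check calls), as a footprint of the segment. -/
theorem widen1 {R f : Nat} {m m' : Mem} (h : Mem.SameExcept [⟨R - 3856, R - 3000⟩] m m') :
    Mem.SameExcept [⟨R - 3856, R - 3000⟩, ⟨f + 48, f + 56⟩, ⟨f + 84, f + 96⟩, ⟨f + 136, f + 144⟩,
      ⟨f + 1484, f + 1749⟩, ⟨f + 1752, f + 1784⟩] m m' := by
  apply h.mono
  intro w hw a h1 h2
  have e1 : w = ⟨R - 3856, R - 3000⟩ := List.mem_singleton.mp hw
  subst e1
  exact ⟨_, List.mem_cons_self, h1, h2⟩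

section Pure
variable {u₀ : State} {others : List Obj} {frames : List (Nat × FrameLayout)} {len : Nat} {Ar : Arena}
  {stored room : Int} {mode : Nat} {ysz : Nat → Nat} {e : State} {ret : Word} {i j k b : Nat} {v s : State}

/-- **The struct of the codebook `b` reads the same over the segment's footprint**: the struct lies in an allocated block (off the
stack region) and is apart from `*f` (`DecodeInv.books`). -/
theorem book_same (hat : At4c u₀ others frames len Ar stored room mode ysz e ret i j k b v)
    (he_room : 0x700000 + 3856 ≤ (e.reg .rsp).toNat) (he_top : (e.reg .rsp).toNat + 8 ≤ 0x800000) {m' : Mem}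
    (hs : Mem.SameExcept [⟨(e.reg .rsp).toNat - 3856, (e.reg .rsp).toNat - 3000⟩, ⟨fOf e + 48, fOf e + 56⟩,
      ⟨fOf e + 84, fOf e + 96⟩, ⟨fOf e + 136, fOf e + 144⟩, ⟨fOf e + 1484, fOf e + 1749⟩,
      ⟨fOf e + 1752, fOf e + 1784⟩] v.mem m') :
    Codebook.SameFields v.mem m' (stb_vorbis.codebooks_at v.mem (fOf e) b) := by
  have hinv := hat.inv
  obtain ⟨B, hB, hBin⟩ := CodebooksUpTo.book_in (groups_laws len) hinv.fb.vorbis.codebooks hat.book_lt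
  have hap := (hinv.books b hat.book_lt).book
  have hBoff := hinv.offStack B hB
  have hBins := hinv.ok.inside B hB
  simp only [vblock, voff] at hBin hBins hap
  generalize stb_vorbis.codebooks_at v.mem (fOf e) b = c at *
  apply Codebook.SameFields.of_sameExcept_off hs (by omega)
  intro w hw
  simp only [List.mem_cons, List.mem_nil_iff, or_false] at hw
  rcases hw with rfl | rfl | rfl | rfl | rfl | rfl <;> simp only [] <;> omega

/-- **The exit assertion `At4d` from the entry assertion `At4c`** over the segment's footprint (the stack below the steady stack
pointer, the bit reader's windows of `*f`): `Loop4.step'` with `k' = k`; the struct of the book reads the same (`book_same`), so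
the DECODE_RAW result over the entry memory is one over the new memory. -/
theorem at4d_of_stores (hat : At4c u₀ others frames len Ar stored room mode ysz e ret i j k b v)
    (he_room : 0x700000 + 3856 ≤ (e.reg .rsp).toNat) (he_top : (e.reg .rsp).toNat + 8 ≤ 0x800000)
    (hrip : s.rip = Vorbis.L.vorbis_decode_packet_rest.at_110cad)
    (hrsp : s.reg .rsp = e.reg .rsp - 3000) (hcode : Vorbis.CodeOK u₀ s.mem) (habi : abiInv s)
    (hrbp : s.reg .rbp = v.reg .rbp) (hr14 : s.reg .r14 = v.reg .r14) (hrbx : s.reg .rbx = v.reg .rbx)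
    (hs : Mem.SameExcept [⟨(e.reg .rsp).toNat - 3856, (e.reg .rsp).toNat - 3000⟩, ⟨fOf e + 48, fOf e + 56⟩,
      ⟨fOf e + 84, fOf e + 96⟩, ⟨fOf e + 136, fOf e + 144⟩, ⟨fOf e + 1484, fOf e + 1749⟩,
      ⟨fOf e + 1752, fOf e + 1784⟩] v.mem s.mem)
    (hb : Bits (RunBlk Ar len) len s.mem (fOf e))
    (hvar : DecodeRawResult v.mem (stb_vorbis.codebooks_at v.mem (fOf e) b) (argInt (s.reg .r12))) :
    At4d u₀ others frames len Ar stored room mode ysz e ret i j k b s := by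
  have hfoff := hat.inv.objOff
  simp only [voff] at hfoff
  have hoff : slot32 e s 0x8 = slot32 e v 0x8 := by
    apply hs.readLE _ 4 (by u_omega)
    intro w hw
    simp only [List.mem_cons, List.mem_nil_iff, or_false] at hw
    rcases hw with rfl | rfl | rfl | rfl | rfl | rfl <;> simp only [] <;> u_omega
  obtain ⟨hbody, ecb, ecc, ecd⟩ := hat.toLoop4.step' (k' := k) he_room he_top hrsp hcode habi
    (by rw [hrbp]; exact hat.rbp) (by rw [hr14]; exact hat.r14) hat.k_le
    (widen6 (by omega) hs) (by rw [hoff]; exact hat.slot_offset) hb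
  have ecat : stb_vorbis.codebooks_at s.mem (fOf e) b = stb_vorbis.codebooks_at v.mem (fOf e) b := by
    unfold stb_vorbis.codebooks_at
    rw [ecb]
  refine ⟨hbody, hrip, by rw [ecd]; exact hat.k_lt, ?_, by rw [ecc]; exact hat.book_lt, ?_⟩
  · rw [ecat, hrbx]
    exact hat.rbx
  · rw [ecat]
    have hN := (book_same hat he_room he_top hs).N
    unfold DecodeRawResult at hvar ⊢
    rw [hN]
    exact hvar

/-- **The decode-time invariant at the call of codebook_decode_scalar_raw** (only return addresses were pushed since the cut), and
the two fields of `*f` that name the codebook. -/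
theorem inv_at_call (hat : At4c u₀ others frames len Ar stored room mode ysz e ret i j k b v)
    (he_room : 0x700000 + 3856 ≤ (e.reg .rsp).toNat) (he_top : (e.reg .rsp).toNat + 8 ≤ 0x800000) {m' : Mem}
    (hs : Mem.SameExcept [⟨(e.reg .rsp).toNat - 3856, (e.reg .rsp).toNat - 3000⟩] v.mem m') :
    DecodeInv others (framesIn frames e) len Ar stored room ysz m' (fOf e) ∧
      stb_vorbis.codebook_count m' (fOf e) = stb_vorbis.codebook_count v.mem (fOf e) ∧
      stb_vorbis.codebooks_at m' (fOf e) b = stb_vorbis.codebooks_at v.mem (fOf e) b := by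
  have hinv := hat.inv
  have hfoff := hinv.objOff
  have hfr := hinv.fb.vorbis.bits.OBR
  simp only [voff] at hfoff hfr
  have hb : Bits (RunBlk Ar len) len m' (fOf e) := Reader.bits_of_window hinv.fb.vorbis.bits hs (by omega)
  have hE : Mem.EqOn (fOf e) (fOf e + 1808) v.mem m' := by
    apply hs.eqOn
    intro w hw
    have e1 : w = ⟨(e.reg .rsp).toNat - 3856, (e.reg .rsp).toNat - 3000⟩ := List.mem_singleton.mp hw
    subst e1
    simp only []
    omega
  refine ⟨round4_inv hinv hat.i_lt (by omega) (by omega) (widen6 (Nat.le_refl _) (widen1 hs)) hb, ?_, ?_⟩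
  · simp only [vacc, voff]
    apply hE.i32 <;> omega
  · have e1 : m'.u64 (fOf e + 168) = v.mem.u64 (fOf e + 168) := by
      apply hE.u64 <;> omega
    simp only [vacc, voff]
    rw [e1]

end Pure


/-- **`valid_bits -= len` did not go negative** (`sub eax, r13d ; jns`, sign flag clear): with `valid_bits ∈ [−1, 32]` (V1) and a
length byte, the stored difference is in `[−1, 32]`: V1 again. A closed bit-vector fact. -/
theorem vb_sub_ok (M : BitVec 32) (L : BitVec 8) (h1 : (4294967295#32).sle M = true) (h2 : M.sle 32#32 = true)
    (hs : (M - BitVec.zeroExtend 32 (BitVec.setWidth 8 (BitVec.zeroExtend 32 L))).msb = false) :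
    (4294967295#32).sle (M - BitVec.zeroExtend 32 (BitVec.setWidth 8 (BitVec.zeroExtend 32 L))) = true ∧
      (M - BitVec.zeroExtend 32 (BitVec.setWidth 8 (BitVec.zeroExtend 32 L))).sle 32#32 = true := by
  bv_decide

/-- The signed form of `vb_sub_ok`, as `BitReader.vb_store` wants it. -/
theorem vb_sub_V1 (M : BitVec 32) (L : BitVec 8) (hM : -1 ≤ M.toInt ∧ M.toInt ≤ 32)
    (hs : (M - BitVec.zeroExtend 32 (BitVec.setWidth 8 (BitVec.zeroExtend 32 L))).msb = false) :
    -1 ≤ (M - BitVec.zeroExtend 32 (BitVec.setWidth 8 (BitVec.zeroExtend 32 L))).toInt ∧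
      (M - BitVec.zeroExtend 32 (BitVec.setWidth 8 (BitVec.zeroExtend 32 L))).toInt ≤ 32 := by
  have e1 : (4294967295#32).toInt = -1 := by decide
  have e2 : (32#32).toInt = 32 := by decide
  have h1 : (4294967295#32).sle M = true := by
    rw [BitVec.sle_eq_decide, e1]
    exact decide_eq_true hM.1
  have h2 : M.sle 32#32 = true := by
    rw [BitVec.sle_eq_decide, e2]
    exact decide_eq_true hM.2
  obtain ⟨k1, k2⟩ := vb_sub_ok M L h1 h2 hs
  rw [BitVec.sle_eq_decide, e1] at k1
  rw [BitVec.sle_eq_decide, e2] at k2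
  exact ⟨of_decide_eq_true k1, of_decide_eq_true k2⟩

/-- The 32-bit load of `valid_bits`, as a signed bit vector, is the field. -/
theorem vb_toInt (mem : Mem) (f m : Nat) (h : mem.readLE (addr f + 1768) 4 = m) :
    (BitVec.ofNat 32 m).toInt = stb_vorbis.valid_bits mem f := by
  have hlt : m < 2 ^ 32 := by
    rw [← h]
    exact Mem.readLE_lt' mem _ 4
  rw [BitVec.toInt_eq_toNat_cond, BitVec.toNat_ofNat, Nat.mod_eq_of_lt hlt]
  rcases Vorbis.Spec.PrepHuffman.vb_cases mem f m h with ⟨h1, h2⟩ | ⟨h1, h2, h3⟩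
  · rw [h2]
    split <;> omega
  · rw [h3]
    split <;> omega

/-- **`mov r12d, eax`** on a callee's `int` result `z`: the copy is the same `int`. -/
theorem result_copy (z : Word) : argInt (Word.ofBV (Word.part .w32 z)) = argInt z := by
  have e1 : (Word.ofBV (Word.part .w32 z)).toNat % 2 ^ 32 = z.toNat % 2 ^ 32 := by
    rw [Vorbis.toNat_ofBV32, Vorbis.toNat_part32, Nat.mod_mod]
  unfold argInt
  rw [e1]

/-- **Segment .4c, PROVED**: 0x110d93–0x110e2c + 0x110c9f–0x110caa, DECODE_RAW inline: the fast path through `fast_huffman` (K5) and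
`codeword_lengths` (K3) with `acc >>= n`, `valid_bits -= n` (reset to 0 and `var = −1` when negative), or the call of
codebook_decode_scalar_raw (`js` at 0x110dc9 taken → 0x110c9f). Ends at the cut 0x110cad with `r12d = var`, a DECODE_RAW result. -/
theorem segC {Lay : Layout} (hLay : Lay.hi = 0x1000000) {μ : Microarch} (hμ : UserX.MicroOK μ) {u₀ : State}
    (hcode : HasCodeNat Lay u₀ Vorbis.L.vorbis_decode_packet_rest.entry Vorbis.Code.code_vorbis_decode_packet_rest.nat Vorbis.L.vorbis_decode_packet_rest.size)
    (h_raw : ∀ (others : List Obj) (frames : List (Nat × FrameLayout)) (Blk : Block → Prop) (len : Nat),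
      Calls Lay μ Vorbis.WayInv (Vorbis.conv u₀) Vorbis.L.codebook_decode_scalar_raw.entry
        (Vorbis.Spec.codebook_decode_scalar_raw.spec others frames Blk len))
    (hl1 : Asan.SmallCheck Lay μ Vorbis.WayInv (Vorbis.CodeOK u₀) [.rax, .rdx] 1 Vorbis.L.__asan_load1_noabort.entry)
    (hl8 : Asan.SmallCheck Lay μ Vorbis.WayInv (Vorbis.CodeOK u₀) [.rax, .rcx, .rdx] 8 Vorbis.L.__asan_load8_noabort.entry)
    (hl4 : Asan.SmallCheck Lay μ Vorbis.WayInv (Vorbis.CodeOK u₀) [.rax, .rcx, .rdx] 4 Vorbis.L.__asan_load4_noabort.entry)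
    (hl2 : Asan.SmallCheck Lay μ Vorbis.WayInv (Vorbis.CodeOK u₀) [.rax, .rcx, .rdx] 2 Vorbis.L.__asan_load2_noabort.entry) :
    Seg4c Lay μ u₀ := by
  intro others frames len Ar stored room mode ysz e ret i j k b v hat
  have he := hat.entry
  v_entry he
  clear he_eq
  have w_rip := hat.rip
  have hrsp_v : v.reg .rsp = e.reg .rsp - 3000 := hat.rsp
  have w_eq : Mem.EqOn Vorbis.L.textLo Vorbis.L.textHi u₀.mem v.mem := hat.code
  have hdf : v.flags .df = false := (show abiInv _ from hat.abi).1
  have hmx : v.mxcsr &&& 0x1F80 = 0x1F80 := (show abiInv _ from hat.abi).2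
  have hsse := Vorbis.sseOK_of_abiInv hat.abi
  have w_kept : RegsKept [.rsp] v v := RegsKept.refl _ _
  have hraw := h_raw others (framesIn frames e) (RunBlk Ar len) len
  obtain ⟨hsh, hinv0, hargs⟩ := hat.pre
  have hinv := hat.inv
  have hok := hinv.ok
  have hL := hinv.live
  have hbits := hinv.fb.vorbis.bits
  have hshadow := hat.shadow
  obtain ⟨f, hf⟩ : ∃ f : Nat, fOf e = f := ⟨_, rfl⟩
  rw [hf] at hinv hbits
  have hrbp : v.reg .rbp = addr f := eq_addr _ _ (by rw [hat.rbp, hf])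
  -- the codebook
  obtain ⟨c, hc⟩ : ∃ c : Nat, stb_vorbis.codebooks_at v.mem f b = c := ⟨_, rfl⟩
  have hblt : (b : Int) < stb_vorbis.codebook_count v.mem f := by
    rw [← hf]
    exact hat.book_lt
  have hrbxn : (v.reg .rbx).toNat = c := by rw [hat.rbx, hf, hc]
  have hrbx : v.reg .rbx = addr c := eq_addr _ _ hrbxn
  have hcbA := hinv.fb.vorbis.codebooks
  obtain ⟨B, hB, hBin⟩ := CodebooksUpTo.book_in (groups_laws len) hcbA hblt
  rw [hc] at hBin
  have hcok : CodebookOK (RunBlk Ar len) v.mem c := by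
    have := hcbA.ok b (by omega)
    rw [hc] at this
    exact this
  have hap : BookApart v.mem f c := by
    rw [← hc]
    exact hinv.books b hblt
  have hBoff := hinv.offStack B hB
  have hBins := hok.inside B hB
  have hfoff := hinv.objOff
  have hfr := hbits.OBR
  have hapb := hap.book
  simp only [vblock, voff] at hBin hBins hfoff hfr hapb
  have hcw : c + 2120 ≤ 0xC00000 ∧ (c + 2120 ≤ 0x700000 ∨ 0x800000 ≤ c) := by omega
  have hfw : f + 1808 ≤ 0xC00000 ∧ (f + 1808 ≤ 0x700000 ∨ 0x800000 ≤ f) := ⟨hfr.2, hfoff⟩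
  clear hfoff
  have eF3 : addr f + 1764 = addr (f + 1764) := addr_add_lit f 1764
  have eF2 : addr f + 1768 = addr (f + 1768) := addr_add_lit f 1768
  have hT7 : (addr (f + 1764)).toNat = f + 1764 := toNat_addr _ (by omega)
  have hT6 : (addr (f + 1768)).toNat = f + 1768 := toNat_addr _ (by omega)
  have hT0 : (addr f).toNat = f := toNat_addr _ (by omega)
  have eC8 : addr c + 8 = addr (c + 8) := addr_add_lit c 8
  have hTc8 : (addr (c + 8)).toNat = c + 8 := toNat_addr _ (by omega)
  have hTc : (addr c).toNat = c := toNat_addr _ (by omega)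
  obtain ⟨A, hA⟩ : ∃ A : Nat, v.mem.readLE (addr (f + 1764)) 4 = A := ⟨_, rfl⟩
  obtain ⟨VB, hVB⟩ : ∃ VB : Nat, v.mem.readLE (addr (f + 1768)) 4 = VB := ⟨_, rfl⟩
  have L8 : v.mem.readLE (addr (c + 8)) 8 = Codebook.codeword_lengths v.mem c := by simp only [vfield, vacc, voff]
  have eK := fast_huffman_addr c A
  have hk1024 : A % 1024 < 1024 := Nat.mod_lt _ (by decide)
  generalize hk : A % 1024 = kk at *
  have hTk : (addr (c + 48 + 2 * kk)).toNat = c + 48 + 2 * kk := toNat_addr _ (by omega)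
  obtain ⟨FH, hFH⟩ : ∃ FH : Nat, v.mem.readLE (addr (c + 48 + 2 * kk)) 2 = FH := ⟨_, rfl⟩
  have hFHlt : FH < 65536 := by
    rw [← hFH]
    exact Mem.readLE_lt' v.mem _ 2
  have hfh : Codebook.fast_huffman v.mem c kk = sint16 FH := by
    simp only [vacc, voff]
    unfold Mem.i16 Mem.u16
    rw [hFH]
  generalize hCL : Codebook.codeword_lengths v.mem c = CL at *
  u_walk hcode [hμ.vendor, eF2, eF3, eC8, eK] until [Vorbis.L.vorbis_decode_packet_rest.at_110cad, Vorbis.L.vorbis_decode_packet_rest.ret19] span [Vorbis.L.textLo, Vorbis.L.textHi] side (v_side)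
  case check_110d9a =>
    -- 0x110d9a: load4 `f->acc`
    have hun : ShadowUntouched v.mem s_110d9a.mem := by v_untouched
    have hs := hbits.site_field hL 1764 4 (by omega) (by omega) (a := f + 1764) rfl
    exact check_site hshadow hun hs hT7
  case check_110db8 =>
    -- 0x110db8: load2 `c->fast_huffman[acc & 1023]`, inside the struct at `c`
    have hun : ShadowUntouched v.mem s_110db8.mem := by v_untouched
    have hs := Codebook.site_field hL hB (by simp only [vblock, voff]; exact hBin) (48 + 2 * kk) 2 (by simp only [voff]; omega)
      (by omega) (a := c + 48 + 2 * kk) (by omega)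
    exact check_site hshadow hun hs hTk
  case check_110dd3 =>
    -- 0x110dd3: load8 `c->codeword_lengths`
    have hun : ShadowUntouched v.mem s_110dd3.mem := by v_untouched
    have hs := Codebook.site_field hL hB (by simp only [vblock, voff]; exact hBin) 8 8 (by simp only [voff]; omega) (by omega)
      (a := c + 8) rfl
    exact check_site hshadow hun hs hTc8
  case call_inv => v_inv
  case pre_110ca5 =>
    -- `BookPre`: only return addresses were pushed since the cut
    have hun : ShadowUntouched v.mem s_110ca5.mem := by v_untouched
    have hsame : Mem.SameExcept [⟨(e.reg .rsp).toNat - 3856, (e.reg .rsp).toNat - 3000⟩] v.mem s_110ca5.mem := by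
      u_same
    have hsh' : ShadowPre others (framesIn frames e) s_110ca5 := by
      refine ⟨?_, hsh.offText⟩
      have e1 : (s_110ca5.reg .rsp).toNat + 8 = (spOf e).toNat := by
        rw [w_rsp]
        show (e.reg .rsp - 3008).toNat + 8 = (e.reg .rsp - 3000).toNat
        u_omega
      rw [e1]
      exact hshadow.untouched hun
    have erdi : (s_110ca5.reg .rdi).toNat = fOf e := by
      rw [w_rdi, hT0, hf]
    obtain ⟨hinv', ecount, ecb⟩ := inv_at_call hat he_room he_top hsame
    refine Vorbis.Spec.PacketRestTest.bookPre_of_inv s_110ca5 b hsh' (by rw [erdi]; exact hinv') ?_ ?_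
    · rw [erdi, ecount]
      exact hat.book_lt
    · rw [erdi, w_rsi, hTc, ecb, hf, hc]
  · -- the slow path, after `codebook_decode_scalar_raw(f, c)` (0x110caa): `mov r12d, eax`
    have c_rdi : (s_110ca5.reg .rdi).toNat = f := by
      rw [w_rdi_110ca5]
      exact hT0
    have hp : ScalarRawPost (RunBlk Ar len) len s_110ca5 s_110ca5r := w_post
    have hsame1 : Mem.SameExcept [⟨(e.reg .rsp).toNat - 3856, (e.reg .rsp).toNat - 3000⟩] v.mem s_110ca5.mem := by
      u_same
    v_after_call w_rsp_110ca5 w_mem_110ca5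
    simp only [c_rdi] at w_same
    have hs6 : Mem.SameExcept [⟨(e.reg .rsp).toNat - 3856, (e.reg .rsp).toNat - 3000⟩, ⟨f + 48, f + 56⟩,
        ⟨f + 84, f + 96⟩, ⟨f + 136, f + 144⟩, ⟨f + 1484, f + 1749⟩, ⟨f + 1752, f + 1784⟩] v.mem s_110ca5r.mem := by
      u_same
    have hb : Bits (RunBlk Ar len) len s_110ca5r.mem f := by
      have hb0 := hp.reader.bits
      rw [c_rdi] at hb0
      exact hb0
    -- the result, over the memory of the segment's entry
    have hres := hp.result
    rw [w_rsi_110ca5, hTc] at hres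
    have hN : Codebook.N s_110ca5.mem c = Codebook.N v.mem c := by
      have h0 := (book_same hat he_room he_top (widen1 hsame1)).N
      rw [hf, hc] at h0
      exact h0
    have hr_rsp := w_rsp
    obtain ⟨z, w_rax⟩ : ∃ z, s_110ca5r.reg .rax = z := ⟨_, rfl⟩
    rw [w_rax] at hres
    have hr_rbp : s_110ca5r.reg .rbp = v.reg .rbp := w_kept .rbp rfl
    have hr_r14 : s_110ca5r.reg .r14 = v.reg .r14 := w_kept .r14 rfl
    have hr_rbx : s_110ca5r.reg .rbx = v.reg .rbx := w_kept .rbx rfl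
    clear w_kept w_same
    u_walk hcode [hμ.vendor] until [Vorbis.L.vorbis_decode_packet_rest.at_110cad] span [Vorbis.L.textLo, Vorbis.L.textHi] side (v_side)
    refine ReachVia.done ?_
    subst hf
    apply at4d_of_stores hat he_room he_top w_rip
    · rw [w_kept .rsp rfl]
      exact hr_rsp
    · exact w_eq
    · show (Vorbis.conv u₀).inv _
      v_inv
    · rw [w_kept .rbp rfl]
      exact hr_rbp
    · rw [w_kept .r14 rfl]
      exact hr_r14
    · rw [w_kept .rbx rfl]
      exact hr_rbx
    · rw [w_mem]
      exact hs6
    · rw [w_mem]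
      exact hb
    · rw [hc, w_r12, result_copy z]
      unfold DecodeRawResult at hres ⊢
      rw [hN] at hres
      exact hres
  · -- the fast path: `fast_huffman[kk] = FH ≥ 0`
    have hH15 : FH < 32768 := by
      rw [sx16_msb FH hFHlt] at hbr_110dc9
      have := of_decide_eq_false hbr_110dc9
      omega
    have hs16 : sint16 FH = (FH : Int) := by
      unfold sint16
      rw [if_pos hH15]
    have e64 := sx16_addr FH hH15
    have e32 := sx16_addr32 FH hH15
    have hfh0 : 0 ≤ Codebook.fast_huffman v.mem c kk := by
      rw [hfh, hs16]
      omega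
    have hsL : Site (LiveSet others (framesIn frames e)) (CL + FH) 1 := by
      have h0 := hcok.site_lengths_of_fast hL kk hk1024 hfh0 rfl
      rw [hfh, hs16] at h0
      rw [← hCL]
      exact h0
    have hsp_top : (spOf e).toNat = (e.reg .rsp).toNat - 3000 := by
      show (e.reg .rsp - 3000).toNat = _
      u_omega
    have hwL := site_where hshadow hsh.offText (by rw [hsp_top]; omega) hsL
    rw [hsp_top] at hwL
    have eL : addr FH + UInt64.ofNat CL = addr (CL + FH) := by
      rw [show UInt64.ofNat CL = addr CL from rfl, addr_add_addr, Nat.add_comm FH CL]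
    have hTL : (addr (CL + FH)).toNat = CL + FH := toNat_addr _ (by omega)
    obtain ⟨LEN, hLEN⟩ : ∃ LEN : Nat, v.mem.readLE (addr (CL + FH)) 1 = LEN := ⟨_, rfl⟩
    have hLEN256 : LEN < 256 := by
      rw [← hLEN]
      exact Mem.readLE_lt' v.mem _ 1
    u_walk hcode [hμ.vendor, eF2, eF3, eC8, e64, eL] until [Vorbis.L.vorbis_decode_packet_rest.at_110cad] span [Vorbis.L.textLo, Vorbis.L.textHi] side (v_side)
    case check_110de3 =>
      -- 0x110de3: load1 `c->codeword_lengths[FH]`: `0 ≤ FH < N(c)` (K5), inside the lengths block (K3)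
      have hun : ShadowUntouched v.mem s_110de3.mem := by v_untouched
      exact check_site hshadow hun hsL hTL
    case check_110e02 =>
      -- 0x110e02: load4 `f->valid_bits`
      have hun : ShadowUntouched v.mem s_110e02.mem := by v_untouched
      have hs := hbits.site_field hL 1768 4 (by omega) (by omega) (a := f + 1768) rfl
      exact check_site hshadow hun hs hT6
    · -- 0x110e16 `jns` taken: the bits are consumed, `var = FH`
      have hV1 := hbits.V1
      have hmI := vb_toInt v.mem f VB (by rw [eF2]; exact hVB)
      have hs6 : Mem.SameExcept [⟨(e.reg .rsp).toNat - 3856, (e.reg .rsp).toNat - 3000⟩, ⟨f + 48, f + 56⟩,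
          ⟨f + 84, f + 96⟩, ⟨f + 136, f + 144⟩, ⟨f + 1484, f + 1749⟩, ⟨f + 1752, f + 1784⟩] v.mem s_110e16.mem := by
        u_same
      have k1 := Vorbis.Spec.BitReader.stack_store hbits (e.reg .rsp - 3008) 1117672 (by u_omega) (by u_omega)
      have k2 := Vorbis.Spec.BitReader.acc_store k1.1 (BitVec.ofNat 32 A >>> ((BitVec.setWidth 8 (BitVec.zeroExtend 32 (BitVec.ofNat 8 LEN))).toNat % 32)).toNat
      have k3 := Vorbis.Spec.BitReader.stack_store k2.1 (e.reg .rsp - 3008) 1117703 (by u_omega) (by u_omega)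
      have k4 := Vorbis.Spec.BitReader.vb_store k3.1 (BitVec.ofNat 32 VB - BitVec.zeroExtend 32 (BitVec.setWidth 8 (BitVec.zeroExtend 32 (BitVec.ofNat 8 LEN)))) (vb_sub_V1 _ _ (by rw [hmI]; exact hV1) hbr_110e16)
      have hb : Bits (RunBlk Ar len) len s_110e16.mem f := by
        rw [w_mem]
        exact k4.1
      have hz : argInt (s_110e16.reg .r12) = (FH : Int) := by
        rw [w_r12, e32]
        unfold argInt sint32
        rw [toNat_addr _ (by omega)]
        have e1 : FH % 2 ^ 32 = FH := Nat.mod_eq_of_lt (by omega)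
        rw [e1, if_pos (by omega)]
      have hr := hcok.decodeRaw_fast kk hk1024
      rw [hfh, hs16] at hr
      refine ReachVia.done ?_
      subst hf
      apply at4d_of_stores hat he_room he_top w_rip w_rsp w_eq
      · show (Vorbis.conv u₀).inv _
        v_inv
      · exact w_kept .rbp rfl
      · exact w_kept .r14 rfl
      · exact w_kept .rbx rfl
      · exact hs6
      · exact hb
      · rw [hc, hz]
        exact hr
    · -- 0x110e1c: `valid_bits` went negative: `valid_bits = 0 ; var = −1`
      have hs6 : Mem.SameExcept [⟨(e.reg .rsp).toNat - 3856, (e.reg .rsp).toNat - 3000⟩, ⟨f + 48, f + 56⟩,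
          ⟨f + 84, f + 96⟩, ⟨f + 136, f + 144⟩, ⟨f + 1484, f + 1749⟩, ⟨f + 1752, f + 1784⟩] v.mem s_110e2c.mem := by
        u_same
      have k1 := Vorbis.Spec.BitReader.stack_store hbits (e.reg .rsp - 3008) 1117672 (by u_omega) (by u_omega)
      have k2 := Vorbis.Spec.BitReader.acc_store k1.1 (BitVec.ofNat 32 A >>> ((BitVec.setWidth 8 (BitVec.zeroExtend 32 (BitVec.ofNat 8 LEN))).toNat % 32)).toNat
      have k3 := Vorbis.Spec.BitReader.stack_store k2.1 (e.reg .rsp - 3008) 1117703 (by u_omega) (by u_omega)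
      have k4 := Vorbis.Spec.BitReader.vb_store k3.1 0#32 (by decide)
      have hb : Bits (RunBlk Ar len) len s_110e2c.mem f := by
        rw [w_mem]
        exact k4.1
      refine ReachVia.done ?_
      subst hf
      apply at4d_of_stores hat he_room he_top w_rip w_rsp w_eq
      · show (Vorbis.conv u₀).inv _
        v_inv
      · exact w_kept .rbp rfl
      · exact w_kept .r14 rfl
      · exact w_kept .rbx rfl
      · exact hs6
      · exact hb
      · left
        rw [w_r12]
        decide

end Vorbis.Spec.vorbis_decode_packet_rest_4c
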